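-- pv_equiv track=rewrite | github.com/mafeconde2002/nonogram | reglas.py | formaClausal
-- ===== SOURCE A (Python) =====
-- def Clausula(C):
--     L=[]
--     while len(C)>0:
--         s=C[0]
--         if s=="^" or s=="°":
--             C=C[1:]
--         elif s=="~":
--             literal=s+C[1]
--             L.append(literal)
--             C=C[2:]
--         else:
--             L.append(s)
--             C=C[1:]
--     return L
--
-- def formaClausal(A):
--     L=[]
--     i=0
--     while len(A)>0:
--         if i==len(A)-1:
--             L.append(Clausula(A))
--             A=''
--         else:
--             if A[i]=="^":
--                 L.append(Clausula(A[:i]))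
--                 A=A[i+1:]
--                 i=0
--             else:
--                 i+=1
--     return L
-- ===== SOURCE B (Python) =====
-- def formaClausal(A):
--     # One linear left-to-right pass with an index pointer: no slicing, no rescanning.
--     if not A:
--         return []
--     L = []
--     cur = []
--     i = 0
--     n = len(A)
--     while i < n:
--         c = A[i]
--         if c == "^" and i < n - 1:
--             L.append(cur)
--             cur = []
--             i += 1
--         elif c == "^" or c == "°":
--             i += 1
--         elif c == "~":
--             cur.append(A[i:i + 2])
--             i += 2
--         else:
--             cur.append(c)
--             i += 1
--     L.append(cur)
--     return L
-- ===== Notes on version B (the rewrite author's own statement) =====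
-- stated objective: faster
-- what changed: Replaced the rescanning splitter (index reset to 0 and string re-sliced after every '^', then a second per-clause scan in Clausula) by one linear left-to-right pass with an index pointer that builds clauses and literals directly.
-- outside the precondition, e.g. on formaClausal('~'): A raises IndexError, B returns [['~']]
import Mathlib
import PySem

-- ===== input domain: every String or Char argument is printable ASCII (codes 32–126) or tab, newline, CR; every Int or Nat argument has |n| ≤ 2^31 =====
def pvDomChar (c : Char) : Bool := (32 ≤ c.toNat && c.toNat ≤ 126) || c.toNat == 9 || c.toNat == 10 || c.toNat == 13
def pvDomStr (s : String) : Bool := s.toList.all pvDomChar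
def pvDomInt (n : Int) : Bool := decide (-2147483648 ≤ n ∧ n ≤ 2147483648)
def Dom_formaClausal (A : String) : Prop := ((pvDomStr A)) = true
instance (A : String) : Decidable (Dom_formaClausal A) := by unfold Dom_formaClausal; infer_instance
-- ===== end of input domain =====

-- B replaces A's rescanning splitter (index reset and string re-slice after every '^', plus a second
-- per-clause scan) by a single linear pass with an index pointer; equivalence is claimed on Pre_,
-- exactly the inputs where the Python A returns (A raises IndexError on a dangling '~').

-- ===== PORT A =====
-- Clausula: scans C; '^'/'°' skipped, '~' takes the next char as a two-char literal, else one-char literal.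
-- On a trailing lone '~' Python's C[1] raises IndexError (excluded by Pre_); the port returns ["~"] there.
def clausA : List Char → List String
  | [] => []
  | c :: rest =>
    if c = '^' ∨ c = '°' then clausA rest
    else if c = '~' then
      match rest with
      | d :: rest' => String.ofList [c, d] :: clausA rest'
      | [] => [String.ofList [c]]
    else String.ofList [c] :: clausA rest

-- the while-loop of formaClausal: state (A, i, L); A[i] is pyGet? (none = IndexError, unreachable from i = 0)
def loopA : List Char → Nat → List (List String) → List (List String)
  | cs, i, L =>
    if _h : cs = [] then L
    else if i = cs.length - 1 then L ++ [clausA cs]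
    else
      match h2 : PySem.List.pyGet? cs (i : Int) with
      | none => L
      | some c =>
        if c = '^' then loopA (cs.drop (i+1)) 0 (L ++ [clausA (cs.take i)])
        else loopA cs (i+1) L
  termination_by cs i _ => (cs.length, cs.length - i)
  decreasing_by
    · have h1 : 0 < cs.length := List.length_pos_iff.mpr _h
      simp only [List.length_drop]
      exact Prod.Lex.left _ _ (by omega)
    · have hi : i < cs.length := by
        by_contra hge
        rw [PySem.List.pyGet?_natCast, List.getElem?_eq_none (by omega)] at h2
        simp at h2
      exact Prod.Lex.right _ (by omega)

def formaClausal (A : String) : List (List String) := loopA A.toList 0 []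

-- ===== PORT B =====
-- one pass; cur is the open clause, a clause closes at a '^' that is not the last character
def scanB : List Char → List String → List (List String)
  | [], cur => [cur]
  | c :: rest, cur =>
    if c = '^' ∧ rest ≠ [] then cur :: scanB rest []
    else if c = '^' ∨ c = '°' then scanB rest cur
    else if c = '~' then
      match rest with
      | d :: rest' => scanB rest' (cur ++ [String.ofList [c, d]])
      | [] => [cur ++ [String.ofList [c]]]   -- A[i:i+2] = "~" at the last position; the loop then ends and cur is appended
    else scanB rest (cur ++ [String.ofList [c]])

def formaClausal_alt (A : String) : List (List String) :=
  if A.toList = [] then [] else scanB A.toList []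

-- ===== PRECONDITION & SPEC =====
-- helper shapes for Pre_: the clause segments of the input (the string split at every '^' that is
-- not its last character; a final '^' stays attached to the last segment), and the length of a
-- segment's maximal trailing run of '~'
def clauseSegs (cs : List Char) : List (List Char) :=
  if cs.getLast? = some '^' then
    (cs.dropLast.splitOn '^').dropLast ++ [(cs.dropLast.splitOn '^').getLastD [] ++ ['^']]
  else cs.splitOn '^'

def tildeRun (S : List Char) : Nat := (S.reverse.takeWhile (· == '~')).length

-- Pre_ excludes exactly the inputs on which the Python A raises IndexError: a clause segment whose
-- maximal trailing run of '~' has odd length leaves a final '~' with no following character in Clausula.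
def Pre_formaClausal (A : String) : Prop :=
  ∀ S ∈ clauseSegs A.toList, tildeRun S % 2 = 0
instance (A : String) : Decidable (Pre_formaClausal A) := by unfold Pre_formaClausal; infer_instance

def pvWitness_formaClausal : String := "p^q~r^^s"

def Spec_formaClausal (A : String) (out : List (List String)) : Prop := out = formaClausal_alt A
instance (A : String) (out : List (List String)) : Decidable (Spec_formaClausal A out) := by unfold Spec_formaClausal; infer_instance

-- ===== CLAIM (what is proved, stated in full; the proofs are below) =====
def Claim_equal_formaClausal : Prop := ∀ (A : String), Dom_formaClausal A → Pre_formaClausal A → Spec_formaClausal A (formaClausal A)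

-- ===== LEMMAS AND PROOFS =====

-- proof-side recursive characterisations, bridged to clauseSegs / tildeRun below
def segsOf : List Char → List (List Char)
  | [] => [[]]
  | c :: rest =>
    if c = '^' ∧ rest ≠ [] then [] :: segsOf rest
    else
      match segsOf rest with
      | s :: ss => (c :: s) :: ss
      | [] => [[c]]

def trailTildes : List Char → Nat
  | [] => 0
  | c :: t => if trailTildes t = t.length ∧ c = '~' then trailTildes t + 1 else trailTildes t


lemma segsOf_ne_nil (cs : List Char) : segsOf cs ≠ [] := by
  induction cs with
  | nil => simp [segsOf]
  | cons c rest ih =>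
    unfold segsOf
    split
    · simp
    · cases h : segsOf rest <;> simp

lemma segsOf_cons_of_not_split (c : Char) (rest : List Char) (s : List Char) (ss : List (List Char))
    (h : ¬(c = '^' ∧ rest ≠ [])) (hr : segsOf rest = s :: ss) :
    segsOf (c :: rest) = (c :: s) :: ss := by
  simp only [segsOf]
  rw [if_neg h, hr]

-- bridges between the proof-side characterisations and the Pre_ shapes
lemma trail_append_singleton (t : List Char) (c : Char) :
    trailTildes (t ++ [c]) = if c = '~' then trailTildes t + 1 else 0 := by
  induction t with
  | nil => by_cases hc : c = '~' <;> simp [trailTildes, hc]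
  | cons a t' ih =>
    by_cases hc : c = '~'
    · rw [if_pos hc] at ih ⊢
      show trailTildes (a :: (t' ++ [c])) = _
      unfold trailTildes
      rw [ih]
      by_cases h : trailTildes t' = t'.length ∧ a = '~'
      · rw [if_pos (by simp [h.1, h.2]), if_pos h]
      · rw [if_neg (by simp; intro he ha; exact h ⟨by omega, ha⟩), if_neg h]
    · rw [if_neg hc] at ih ⊢
      show trailTildes (a :: (t' ++ [c])) = _
      unfold trailTildes
      rw [ih]
      have : (t' ++ [c]).length = t'.length + 1 := by simp
      rw [if_neg (by simp [this])]

lemma trailTildes_eq_tildeRun (S : List Char) : trailTildes S = tildeRun S := by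
  induction S using List.reverseRecOn with
  | nil => simp [trailTildes, tildeRun]
  | append_singleton t c ih =>
    rw [trail_append_singleton]
    unfold tildeRun
    rw [List.reverse_append]
    simp only [List.reverse_cons, List.reverse_nil, List.nil_append, List.singleton_append,
      List.takeWhile_cons]
    by_cases hc : c = '~'
    · rw [if_pos hc, if_pos (by simp [hc])]
      simpa [tildeRun] using ih
    · rw [if_neg hc, if_neg (by simp [hc])]
      simp

lemma getLast?_cons_ne_nil (c : Char) (rest : List Char) (h : rest ≠ []) :
    (c :: rest).getLast? = rest.getLast? := by
  cases rest with
  | nil => exact absurd rfl h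
  | cons v vs => simp

lemma splitOn_caret_cons (c : Char) (t : List Char) :
    (c :: t).splitOn '^' = if c = '^' then [] :: t.splitOn '^' else (t.splitOn '^').modifyHead (List.cons c) := by
  by_cases hc : c = '^' <;> simp [List.splitOn, List.splitOnP_cons, hc]

lemma segsOf_eq_splitOn (cs : List Char) (h : cs.getLast? ≠ some '^') :
    segsOf cs = cs.splitOn '^' := by
  induction cs with
  | nil => simp [segsOf]
  | cons c rest ih =>
    by_cases hr : rest = []
    · subst hr
      simp only [List.getLast?_singleton] at h
      have hc : c ≠ '^' := by intro hc; exact h (by rw [hc])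
      simp [segsOf, List.splitOn, List.splitOnP_cons, hc]
    · rw [getLast?_cons_ne_nil c rest hr] at h
      have ihr := ih h
      by_cases hc : c = '^'
      · subst hc
        have hs : segsOf ('^' :: rest) = [] :: segsOf rest := by
          simp only [segsOf]; rw [if_pos (by simp [hr])]
        rw [hs, ihr, splitOn_caret_cons, if_pos rfl]
      · obtain ⟨s', ss', hrr⟩ := List.exists_cons_of_ne_nil (segsOf_ne_nil rest)
        rw [segsOf_cons_of_not_split c rest s' ss' (by simp [hc]) hrr]
        rw [hrr] at ihr
        rw [splitOn_caret_cons, if_neg hc, ← ihr]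
        simp

lemma getLastD_cons_of_ne_nil (a : List Char) (l : List (List Char)) (h : l ≠ []) :
    (a :: l).getLastD [] = l.getLastD [] := by
  cases l with
  | nil => exact absurd rfl h
  | cons v vs => rfl

lemma segsOf_concat_caret (t : List Char) :
    segsOf (t ++ ['^']) = (t.splitOn '^').dropLast ++ [(t.splitOn '^').getLastD [] ++ ['^']] := by
  induction t with
  | nil => simp [segsOf, List.splitOn]
  | cons c t' ih =>
    have hne : t' ++ ['^'] ≠ [] := by simp
    have hKne : t'.splitOn '^' ≠ [] := List.splitOnP_ne_nil _ t'
    rw [List.cons_append, splitOn_caret_cons]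
    by_cases hc : c = '^'
    · subst hc
      have hs : segsOf ('^' :: (t' ++ ['^'])) = [] :: segsOf (t' ++ ['^']) := by
        simp only [segsOf]; rw [if_pos (by simp)]
      rw [hs, ih, if_pos rfl]
      rw [List.dropLast_cons_of_ne_nil hKne, getLastD_cons_of_ne_nil _ _ hKne]
      simp
    · rw [if_neg hc]
      obtain ⟨u, us, hu⟩ := List.exists_cons_of_ne_nil hKne
      rw [hu] at ih ⊢
      cases us with
      | nil =>
        simp only [List.dropLast_singleton, List.nil_append, List.getLastD_cons,
          List.getLastD_nil] at ih
        rw [segsOf_cons_of_not_split c (t' ++ ['^']) (u ++ ['^']) [] (by simp [hc]) ih]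
        simp
      | cons v vs =>
        have hvne : (v :: vs : List (List Char)) ≠ [] := by simp
        rw [List.dropLast_cons_of_ne_nil hvne, getLastD_cons_of_ne_nil _ _ hvne] at ih
        rw [segsOf_cons_of_not_split c (t' ++ ['^']) u _ (by simp [hc]) ih]
        rw [List.modifyHead_cons, List.dropLast_cons_of_ne_nil hvne,
          getLastD_cons_of_ne_nil _ _ hvne]
        simp

lemma segsOf_eq_clauseSegs (cs : List Char) : segsOf cs = clauseSegs cs := by
  unfold clauseSegs
  by_cases h : cs.getLast? = some '^'
  · rw [if_pos h]
    have hne : cs ≠ [] := by intro hnil; rw [hnil] at h; simp at h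
    have hdecomp : cs = cs.dropLast ++ ['^'] := by
      conv_lhs => rw [← List.dropLast_concat_getLast hne]
      rw [List.getLast_eq_iff_getLast?_eq_some hne |>.mpr h]
    conv_lhs => rw [hdecomp]
    rw [segsOf_concat_caret]
  · rw [if_neg h]
    exact segsOf_eq_splitOn cs h

lemma trail_le (t : List Char) : trailTildes t ≤ t.length := by
  induction t with
  | nil => simp [trailTildes]
  | cons c t ih =>
    unfold trailTildes
    split <;> simp <;> omega

lemma trail_cons_ne (c : Char) (t : List Char) (hc : c ≠ '~') :
    trailTildes (c :: t) = trailTildes t := by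
  cases t <;> simp [trailTildes, hc]

lemma even_trail_tail (b : Char) (t : List Char)
    (h : trailTildes ('~' :: b :: t) % 2 = 0) : trailTildes t % 2 = 0 := by
  have hle := trail_le t
  simp only [trailTildes, List.length_cons] at h
  split_ifs at h <;> simp_all
  omega

-- a '^'-free-but-last list is a single segment
lemma segsOf_single (cs : List Char) (h : ∀ c ∈ cs.dropLast, c ≠ '^') : segsOf cs = [cs] := by
  induction cs with
  | nil => simp [segsOf]
  | cons c rest ih =>
    by_cases hr : rest = []
    · subst hr; simp [segsOf]
    · have hc : c ≠ '^' := h c (by rw [List.dropLast_cons_of_ne_nil hr]; exact List.mem_cons_self)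
      have hrest : segsOf rest = [rest] := ih (fun x hx => h x (by rw [List.dropLast_cons_of_ne_nil hr]; exact List.mem_cons_of_mem _ hx))
      exact segsOf_cons_of_not_split c rest rest [] (by simp [hc]) hrest

-- splitting at the first '^' (position i, not last)
lemma segsOf_split (i : Nat) (cs : List Char) (hi : i + 1 < cs.length)
    (hc : cs[i]? = some '^') (hfree : ∀ c ∈ cs.take i, c ≠ '^') :
    segsOf cs = cs.take i :: segsOf (cs.drop (i+1)) := by
  induction i generalizing cs with
  | zero =>
    cases cs with
    | nil => simp at hi
    | cons c rest =>
      simp at hc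
      subst hc
      have hrne : rest ≠ [] := by simp at hi; exact List.ne_nil_of_length_pos hi
      simp only [segsOf]
      rw [if_pos (by simp [hrne])]
      simp
  | succ i ih =>
    cases cs with
    | nil => simp at hi
    | cons c rest =>
      have hcne : c ≠ '^' := hfree c (by simp [List.take_succ_cons])
      simp only [List.getElem?_cons_succ] at hc
      simp only [List.length_cons] at hi
      have hrec := ih rest (by omega) hc
        (fun x hx => hfree x (by simp [List.take_succ_cons]; right; exact hx))
      rw [List.take_succ_cons, List.drop_succ_cons]
      exact segsOf_cons_of_not_split c rest _ _ (by simp [hcne]) hrec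

lemma loopA_spec (cs : List Char) (i : Nat) (L : List (List String)) :
    cs ≠ [] → i < cs.length → (∀ c ∈ cs.take i, c ≠ '^') →
    loopA cs i L = L ++ (segsOf cs).map clausA := by
  induction cs, i, L using loopA.induct with
  | case1 i L =>
    intro hne _ _
    exact absurd rfl hne
  | case2 cs L hne =>
    intro _ _ hfree
    rw [loopA]
    rw [dif_neg hne, if_pos rfl]
    have : segsOf cs = [cs] := segsOf_single cs (by
      intro x hx
      apply hfree x
      rwa [List.dropLast_eq_take] at hx)
    rw [this]
    simp
  | case3 cs i L hne hil h2 =>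
    intro _ hi _
    rw [PySem.List.pyGet?_natCast, List.getElem?_eq_none_iff] at h2
    omega
  | case4 cs i L hne hil h2 ih =>
    intro _ hi hfree
    have hgete : cs[i]? = some '^' := by rwa [PySem.List.pyGet?_natCast] at h2
    have hi1 : i + 1 < cs.length := by omega
    rw [loopA, dif_neg hne, if_neg hil]
    split
    · rename_i heq; rw [h2] at heq; exact absurd heq (by simp)
    · rename_i c' heq
      rw [h2] at heq
      injection heq with hc'
      subst hc'
      rw [if_pos rfl]
      rw [ih (by
            intro hd
            have := congrArg List.length hd
            simp at this
            omega)
          (by simp; omega) (by simp)]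
      rw [segsOf_split i cs hi1 hgete hfree]
      simp
  | case5 cs i L hne hil c h2 hc ih =>
    intro _ hi hfree
    rw [loopA, dif_neg hne, if_neg hil]
    have hgete : cs[i]? = some c := by rwa [PySem.List.pyGet?_natCast] at h2
    have hstep : (∀ x ∈ cs.take (i+1), x ≠ '^') := by
      intro x hx
      rw [List.take_succ, hgete] at hx
      simp at hx
      rcases hx with hx | hx
      · exact hfree x hx
      · subst hx; exact hc
    split
    · rename_i heq; rw [h2] at heq; exact absurd heq (by simp)
    · rename_i c' heq
      rw [h2] at heq
      injection heq with hc'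
      subst hc'
      rw [if_neg hc]
      exact ih hne (by omega) hstep

lemma scanB_spec (cs : List Char) (cur : List String) :
    ∀ s ss, segsOf cs = s :: ss → (∀ S ∈ segsOf cs, trailTildes S % 2 = 0) →
    scanB cs cur = (cur ++ clausA s) :: ss.map clausA := by
  induction cs, cur using scanB.induct with
  | case1 cur =>
    intro s ss hseg _
    simp only [segsOf] at hseg
    injection hseg with e1 e2
    subst e1; subst e2
    simp [scanB, clausA]
  | case2 c rest cur hsplit ih =>
    intro s ss hseg hok
    have hs : segsOf (c :: rest) = [] :: segsOf rest := by
      simp only [segsOf]; rw [if_pos hsplit]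
    rw [hs] at hseg
    injection hseg with e1 e2
    subst e1; subst e2
    obtain ⟨s', ss', hr⟩ := List.exists_cons_of_ne_nil (segsOf_ne_nil rest)
    rw [scanB.eq_def]
    simp only []
    rw [if_pos hsplit]
    rw [ih s' ss' hr (fun S hS => hok S (by rw [hs]; exact List.mem_cons_of_mem _ hS))]
    rw [hr]
    simp [clausA]
  | case3 c rest cur hsplit hskip ih =>
    intro s ss hseg hok
    obtain ⟨s', ss', hr⟩ := List.exists_cons_of_ne_nil (segsOf_ne_nil rest)
    have hs := segsOf_cons_of_not_split c rest s' ss' hsplit hr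
    rw [hs] at hseg
    injection hseg with e1 e2
    subst e1; subst e2
    have hcne : c ≠ '~' := by rcases hskip with h | h <;> subst h <;> decide
    have hhead : trailTildes (c :: s') % 2 = 0 := hok _ (by rw [hs]; simp)
    have hs'ev : trailTildes s' % 2 = 0 := by rwa [trail_cons_ne c s' hcne] at hhead
    have hokr : ∀ S ∈ segsOf rest, trailTildes S % 2 = 0 := by
      intro S hS
      rw [hr] at hS
      rcases List.mem_cons.mp hS with rfl | hS'
      · exact hs'ev
      · exact hok S (by rw [hs]; exact List.mem_cons_of_mem _ hS')
    rw [scanB.eq_def]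
    simp only []
    rw [if_neg hsplit, if_pos hskip]
    rw [ih s' ss' hr hokr]
    have hcl : clausA (c :: s') = clausA s' := by
      rw [clausA.eq_def]; simp only []; rw [if_pos hskip]
    rw [hcl]
  | case4 cur d rest' hns hsplit ih =>
    intro s ss hseg hok
    by_cases hd : d = '^' ∧ rest' ≠ []
    · have hsr : segsOf (d :: rest') = [] :: segsOf rest' := by
        simp only [segsOf]; rw [if_pos hd]
      have hs := segsOf_cons_of_not_split '~' (d :: rest') [] _ (by simp) hsr
      have hcontra := hok ['~'] (by rw [hs]; simp)
      simp [trailTildes] at hcontra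
    · obtain ⟨s'', ss'', hr'⟩ := List.exists_cons_of_ne_nil (segsOf_ne_nil rest')
      have hsr := segsOf_cons_of_not_split d rest' s'' ss'' hd hr'
      have hs := segsOf_cons_of_not_split '~' (d :: rest') (d :: s'') ss'' (by simp) hsr
      rw [hs] at hseg
      injection hseg with e1 e2
      subst e1; subst e2
      have hhead : trailTildes ('~' :: d :: s'') % 2 = 0 := hok _ (by rw [hs]; simp)
      have hev := even_trail_tail d s'' hhead
      have hokr : ∀ S ∈ segsOf rest', trailTildes S % 2 = 0 := by
        intro S hS
        rw [hr'] at hS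
        rcases List.mem_cons.mp hS with rfl | hS'
        · exact hev
        · exact hok S (by rw [hs]; exact List.mem_cons_of_mem _ hS')
      show scanB rest' (cur ++ [String.ofList ['~', d]]) = _
      rw [ih s'' ss'' hr' hokr]
      have hcl : clausA ('~' :: d :: s'') = String.ofList ['~', d] :: clausA s'' := rfl
      rw [hcl]
      simp
  | case5 cur hns hsplit =>
    intro s ss hseg hok
    have h1 : segsOf ['~'] = [['~']] := by simp [segsOf]
    have hcontra := hok ['~'] (by rw [h1]; simp)
    simp [trailTildes] at hcontra
  | case6 c rest cur hsplit hskip htil ih =>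
    intro s ss hseg hok
    obtain ⟨s', ss', hr⟩ := List.exists_cons_of_ne_nil (segsOf_ne_nil rest)
    have hs := segsOf_cons_of_not_split c rest s' ss' hsplit hr
    rw [hs] at hseg
    injection hseg with e1 e2
    subst e1; subst e2
    have hhead : trailTildes (c :: s') % 2 = 0 := hok _ (by rw [hs]; simp)
    have hs'ev : trailTildes s' % 2 = 0 := by rwa [trail_cons_ne c s' htil] at hhead
    have hokr : ∀ S ∈ segsOf rest, trailTildes S % 2 = 0 := by
      intro S hS
      rw [hr] at hS
      rcases List.mem_cons.mp hS with rfl | hS'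
      · exact hs'ev
      · exact hok S (by rw [hs]; exact List.mem_cons_of_mem _ hS')
    rw [scanB.eq_def]
    simp only []
    rw [if_neg hsplit, if_neg hskip, if_neg htil]
    rw [ih s' ss' hr hokr]
    have hcl : clausA (c :: s') = String.ofList [c] :: clausA s' := by
      rw [clausA.eq_def]; simp only []; rw [if_neg hskip, if_neg htil]
    rw [hcl]
    simp

-- ===== VERDICT (by name: the statement is the Claim_ definition above) =====
theorem formaClausal_spec : Claim_equal_formaClausal := by
  intro A _ hPre
  unfold Spec_formaClausal formaClausal formaClausal_alt
  by_cases hnil : A.toList = []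
  · rw [hnil]; simp [loopA]
  · rw [if_neg hnil]
    obtain ⟨s, ss, hseg⟩ : ∃ s ss, segsOf A.toList = s :: ss := by
      cases h : segsOf A.toList with
      | nil => exact absurd h (segsOf_ne_nil _)
      | cons s ss => exact ⟨s, ss, rfl⟩
    have hPre' : ∀ S ∈ segsOf A.toList, trailTildes S % 2 = 0 := by
      intro S hS
      rw [trailTildes_eq_tildeRun]
      exact hPre S (by rwa [← segsOf_eq_clauseSegs])
    rw [loopA_spec A.toList 0 [] hnil (List.length_pos_iff.mpr hnil) (by simp),
        scanB_spec A.toList [] s ss hseg hPre', hseg]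
    simp
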